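-- pv_equiv track=rewrite | github.com/nobuo0316/salary-related-cofficient-calclator | streamlit_app.py | best_effort_find_code
-- ===== SOURCE A (Python) =====
-- def best_effort_find_code(options, label_guess: str):
--     """
--     options: list of (code, label)
--     tries exact match then contains match.
--     """
--     if not label_guess:
--         return None
--     g = label_guess.strip().lower()
--     # exact
--     for code, label in options:
--         if label.strip().lower() == g:
--             return code
--     # contains
--     for code, label in options:
--         if g in label.strip().lower():
--             return code
--     return None
-- ===== SOURCE B (Python) =====
-- def best_effort_find_code(options, label_guess: str):
--     """
--     options: list of (code, label)
--     Single pass: exact match returns immediately; the first containment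
--     match is remembered as a fallback and returned after the scan.
--     """
--     if not label_guess:
--         return None
--     g = label_guess.strip().lower()
--     fallback = None
--     for code, label in options:
--         folded = label.strip().lower()
--         if folded == g:
--             return code
--         if fallback is None and g in folded:
--             fallback = code
--     return fallback
-- ===== Notes on version B (the rewrite author's own statement) =====
-- stated objective: simpler
-- what changed: replaces A's two sequential scans (exact pass, then containment pass) by one single pass that returns on an exact match and carries the first containment match as a fallback
import Mathlib
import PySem

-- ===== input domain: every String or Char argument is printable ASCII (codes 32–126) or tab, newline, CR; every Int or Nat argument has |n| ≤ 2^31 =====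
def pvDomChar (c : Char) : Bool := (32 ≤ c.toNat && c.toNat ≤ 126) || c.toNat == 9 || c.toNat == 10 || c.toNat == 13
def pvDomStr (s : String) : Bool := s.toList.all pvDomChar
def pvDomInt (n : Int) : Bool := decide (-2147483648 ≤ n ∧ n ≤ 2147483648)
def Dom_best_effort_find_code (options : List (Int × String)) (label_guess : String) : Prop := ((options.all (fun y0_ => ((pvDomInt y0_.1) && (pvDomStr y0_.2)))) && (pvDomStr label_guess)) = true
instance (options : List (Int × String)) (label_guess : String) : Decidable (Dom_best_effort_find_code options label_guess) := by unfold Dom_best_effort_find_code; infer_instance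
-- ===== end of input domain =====

-- B replaces A's two sequential scans by one pass carrying a containment fallback (objective: simpler).

-- ===== PORT A =====
-- first loop of A: return code on exact (stripped+lowered) label match
def pvA_exactLoop (g : String) : List (Int × String) → Option Int
  | [] => none
  | (code, label) :: rest =>
      if PySem.Str.lower (PySem.Str.strip label) == g then some code
      else pvA_exactLoop g rest

-- second loop of A: return code when g occurs in the stripped+lowered label
def pvA_containsLoop (g : String) : List (Int × String) → Option Int
  | [] => none
  | (code, label) :: rest =>
      if PySem.Str.isIn g (PySem.Str.lower (PySem.Str.strip label)) then some code
      else pvA_containsLoop g rest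

def best_effort_find_code (options : List (Int × String)) (label_guess : String) : Option Int :=
  if label_guess == "" then none
  else
    let g := PySem.Str.lower (PySem.Str.strip label_guess)
    match pvA_exactLoop g options with
    | some code => some code
    | none => pvA_containsLoop g options

-- ===== PORT B =====
-- single pass: exact match returns immediately, first containment match kept as fallback
def pvB_loop (g : String) : List (Int × String) → Option Int → Option Int
  | [], fallback => fallback
  | (code, label) :: rest, fallback =>
      let folded := PySem.Str.lower (PySem.Str.strip label)
      if folded == g then some code
      else pvB_loop g rest
        (if fallback.isNone && PySem.Str.isIn g folded then some code else fallback)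

def best_effort_find_code_alt (options : List (Int × String)) (label_guess : String) : Option Int :=
  if label_guess == "" then none
  else pvB_loop (PySem.Str.lower (PySem.Str.strip label_guess)) options none

-- ===== PRECONDITION & SPEC =====
def Spec_best_effort_find_code (options : List (Int × String)) (label_guess : String) (out : Option Int) : Prop := out = best_effort_find_code_alt options label_guess
instance (options : List (Int × String)) (label_guess : String) (out : Option Int) : Decidable (Spec_best_effort_find_code options label_guess out) := by unfold Spec_best_effort_find_code; infer_instance

-- ===== CLAIM (what is proved, stated in full; the proofs are below) =====
def Claim_equal_best_effort_find_code : Prop := ∀ (options : List (Int × String)) (label_guess : String), Dom_best_effort_find_code options label_guess → Spec_best_effort_find_code options label_guess (best_effort_find_code options label_guess)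

-- ===== LEMMAS AND PROOFS =====
theorem pvB_loop_eq (g : String) (opts : List (Int × String)) (fb : Option Int) :
    pvB_loop g opts fb =
      match pvA_exactLoop g opts with
      | some c => some c
      | none => match fb with
                | some c => some c
                | none => pvA_containsLoop g opts := by
  induction opts generalizing fb with
  | nil => cases fb <;> simp [pvB_loop, pvA_exactLoop, pvA_containsLoop]
  | cons p rest ih =>
      obtain ⟨code, label⟩ := p
      simp only [pvB_loop, pvA_exactLoop, pvA_containsLoop]
      generalize (PySem.Str.lower (PySem.Str.strip label) == g) = b
      generalize PySem.Str.isIn g (PySem.Str.lower (PySem.Str.strip label)) = c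
      cases b
      · simp only [Bool.false_eq_true, if_false, ih]
        cases fb <;> cases c <;> cases pvA_exactLoop g rest <;> simp
      · simp

-- ===== VERDICT (by name: the statement is the Claim_ definition above) =====
theorem best_effort_find_code_spec : Claim_equal_best_effort_find_code := by
  intro options label_guess _
  unfold Spec_best_effort_find_code best_effort_find_code best_effort_find_code_alt
  by_cases h : label_guess == ""
  · simp [h]
  · simp only [h, pvB_loop_eq]
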